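-- pv_equiv track=rewrite | github.com/Sudheep24/Domain-Model | main.py | map_skills_to_domain
-- ===== SOURCE A (Python) =====
-- domain_skills = {
--   "Full Stack Software Development": [1, 2, 3, 4, 6, 7, 11, 14, 16],
--   "Data Science": [8, 19, 20, 21, 22, 23, 24, 25, 26],
--   "Machine Learning Engineering": [8, 20, 21, 22, 23, 24, 30, 32, 33, 34],
--   "Cybersecurity": [35, 36, 37, 38, 39, 40, 41, 42, 43],
--   "Software Engineering": [1, 3, 10, 47, 48, 49, 50, 51, 53],
--   "Cloud Engineering": [16, 17, 18, 56, 57, 58, 62, 63, 65],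
--   "Web Development": [1, 2, 3, 4, 5, 14, 70, 71, 72],
--   "DevOps": [16, 18, 56, 57, 58, 73, 74, 75, 76],
--   "Game Development": [47, 80, 81, 82, 83, 84, 85, 86],
--   "IT Support": [88, 89, 90, 91, 92, 93, 94, 95, 96]
-- }
--
-- domain_difficulty_marks = {
--     "Full Stack Software Development": (80, 100),
--     "Data Science": (70, 90),
--     "Machine Learning Engineering": (85, 100),
--     "Cybersecurity": (90, 100),
--     "Software Engineering": (75, 95),
--     "Cloud Engineering": (70, 90),
--     "Web Development": (60, 80),
--     "DevOps": (80, 95),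
--     "Game Development": (65, 85),
--     "IT Support": (50, 70)
-- }
--
-- def map_skills_to_domain(skill_ids):
--     domain_skill_counts = {domain: 0 for domain in domain_skills}
--
--     for domain, skills in domain_skills.items():
--         skill_set = set(skills)
--         user_skill_set = set(skill_ids)
--         common_skills = skill_set.intersection(user_skill_set)
--         domain_skill_counts[domain] = len(common_skills)
--
--     max_skill_count = max(domain_skill_counts.values())
--     top_domains = [domain for domain, count in domain_skill_counts.items() if count == max_skill_count]
--
--     if len(top_domains) == 1:
--         return top_domains[0]
--
--     def get_domain_rank(domain, math_mark, aptitude_mark, science_mark):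
--         min_mark, max_mark = domain_difficulty_marks[domain]
--         rank = 0
--         if math_mark >= min_mark:
--             rank += 1
--         if aptitude_mark >= min_mark:
--             rank += 1
--         if science_mark >= min_mark:
--             rank += 1
--         return rank
--
--     user_marks = {
--         "Math": 85,
--         "Aptitude": 80,
--         "Science": 90
--     }
--
--     ranked_domains = sorted(
--         top_domains,
--         key=lambda domain: get_domain_rank(domain, user_marks["Math"], user_marks["Aptitude"], user_marks["Science"]),
--         reverse=True
--     )
--
--     return ranked_domains[0]
-- ===== SOURCE B (Python) =====
-- domain_skills = {
--   "Full Stack Software Development": [1, 2, 3, 4, 6, 7, 11, 14, 16],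
--   "Data Science": [8, 19, 20, 21, 22, 23, 24, 25, 26],
--   "Machine Learning Engineering": [8, 20, 21, 22, 23, 24, 30, 32, 33, 34],
--   "Cybersecurity": [35, 36, 37, 38, 39, 40, 41, 42, 43],
--   "Software Engineering": [1, 3, 10, 47, 48, 49, 50, 51, 53],
--   "Cloud Engineering": [16, 17, 18, 56, 57, 58, 62, 63, 65],
--   "Web Development": [1, 2, 3, 4, 5, 14, 70, 71, 72],
--   "DevOps": [16, 18, 56, 57, 58, 73, 74, 75, 76],
--   "Game Development": [47, 80, 81, 82, 83, 84, 85, 86],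
--   "IT Support": [88, 89, 90, 91, 92, 93, 94, 95, 96]
-- }
--
-- domain_difficulty_marks = {
--     "Full Stack Software Development": (80, 100),
--     "Data Science": (70, 90),
--     "Machine Learning Engineering": (85, 100),
--     "Cybersecurity": (90, 100),
--     "Software Engineering": (75, 95),
--     "Cloud Engineering": (70, 90),
--     "Web Development": (60, 80),
--     "DevOps": (80, 95),
--     "Game Development": (65, 85),
--     "IT Support": (50, 70)
-- }
--
-- def map_skills_to_domain(skill_ids):
--     # One pass in insertion order, keeping the best (match count, rank) pair.
--     # Strict improvement only, so the earliest domain wins all ties.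
--     user_skills = set(skill_ids)
--     best_domain, best_count, best_rank = None, -1, -1
--     for domain, skills in domain_skills.items():
--         count = sum(1 for s in skills if s in user_skills)
--         min_mark = domain_difficulty_marks[domain][0]
--         rank = (85 >= min_mark) + (80 >= min_mark) + (90 >= min_mark)
--         if count > best_count or (count == best_count and rank > best_rank):
--             best_domain, best_count, best_rank = domain, count, rank
--     return best_domain
-- ===== Notes on version B (the rewrite author's own statement) =====
-- stated objective: simpler
-- what changed: Replaces the counts dict + max() + top-domains filter + conditional stable sort with a single pass over the domains keeping the best (match count, rank) pair under strict lexicographic improvement, so the first domain in insertion order wins all ties; the user skill set is built once instead of per domain.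
import Mathlib
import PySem

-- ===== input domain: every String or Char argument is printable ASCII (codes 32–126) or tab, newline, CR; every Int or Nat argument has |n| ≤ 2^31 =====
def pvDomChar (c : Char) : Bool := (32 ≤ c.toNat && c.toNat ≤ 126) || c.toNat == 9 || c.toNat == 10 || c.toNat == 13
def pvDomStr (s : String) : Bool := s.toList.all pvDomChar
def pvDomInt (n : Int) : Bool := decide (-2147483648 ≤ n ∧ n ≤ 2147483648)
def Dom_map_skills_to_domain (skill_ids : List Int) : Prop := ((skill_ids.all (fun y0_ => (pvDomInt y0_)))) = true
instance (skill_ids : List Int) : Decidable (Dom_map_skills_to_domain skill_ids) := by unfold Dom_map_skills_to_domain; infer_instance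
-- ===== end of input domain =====

-- B replaces A's counts dict + max + top-domains filter + conditional stable sort by one
-- strict-improvement pass keeping the best (match count, rank) pair (objective: simpler).

-- ===== PORT A =====
-- module-level constants shared by both implementations
def domainSkills : PySem.Dict String (List Int) := PySem.Dict.mk
  [("Full Stack Software Development", [1, 2, 3, 4, 6, 7, 11, 14, 16]),
   ("Data Science", [8, 19, 20, 21, 22, 23, 24, 25, 26]),
   ("Machine Learning Engineering", [8, 20, 21, 22, 23, 24, 30, 32, 33, 34]),
   ("Cybersecurity", [35, 36, 37, 38, 39, 40, 41, 42, 43]),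
   ("Software Engineering", [1, 3, 10, 47, 48, 49, 50, 51, 53]),
   ("Cloud Engineering", [16, 17, 18, 56, 57, 58, 62, 63, 65]),
   ("Web Development", [1, 2, 3, 4, 5, 14, 70, 71, 72]),
   ("DevOps", [16, 18, 56, 57, 58, 73, 74, 75, 76]),
   ("Game Development", [47, 80, 81, 82, 83, 84, 85, 86]),
   ("IT Support", [88, 89, 90, 91, 92, 93, 94, 95, 96])]

def domainDifficultyMarks : PySem.Dict String (Int × Int) := PySem.Dict.mk
  [("Full Stack Software Development", (80, 100)),
   ("Data Science", (70, 90)),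
   ("Machine Learning Engineering", (85, 100)),
   ("Cybersecurity", (90, 100)),
   ("Software Engineering", (75, 95)),
   ("Cloud Engineering", (70, 90)),
   ("Web Development", (60, 80)),
   ("DevOps", (80, 95)),
   ("Game Development", (65, 85)),
   ("IT Support", (50, 70))]

-- A's nested helper get_domain_rank; the KeyError branch (unknown domain) is unreachable
-- in A, the 0 in the none branch is only a totality guard
def getDomainRank (domain : String) (math_mark aptitude_mark science_mark : Int) : Int :=
  match domainDifficultyMarks.get? domain with
  | none => 0
  | some mm =>
    (0 : Int) + (if math_mark ≥ mm.1 then 1 else 0) + (if aptitude_mark ≥ mm.1 then 1 else 0)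
      + (if science_mark ≥ mm.1 then 1 else 0)

def map_skills_to_domain (skill_ids : List Int) : String :=
  let init : PySem.Dict String Int := PySem.Dict.mk (domainSkills.keys.map (fun k => (k, (0 : Int))))
  let counts := domainSkills.items.foldl (fun d p =>
      let skill_set := PySem.Set.ofList p.2
      let user_skill_set : PySem.Set Int := PySem.Set.ofList skill_ids
      let common := PySem.Set.inter skill_set user_skill_set
      d.insert p.1 (PySem.Set.len common)) init
  match PySem.List.max? counts.values (fun x => x) with
  | none => ""   -- unreachable: counts always has ten values (max() of an empty list would raise)
  | some max_skill_count =>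
    let top := (counts.items.filter (fun p => p.2 == max_skill_count)).map Prod.fst
    if top.length = 1 then
      match top with | t0 :: _ => t0 | [] => ""   -- [] unreachable: top.length = 1
    else
      let user_marks : PySem.Dict String Int := PySem.Dict.mk [("Math", 85), ("Aptitude", 80), ("Science", 90)]
      match PySem.List.sorted top
          (fun d => getDomainRank d (user_marks.getD "Math" 0) (user_marks.getD "Aptitude" 0) (user_marks.getD "Science" 0))
          true with
      | r0 :: _ => r0
      | [] => ""   -- unreachable: top is nonempty

-- ===== PORT B =====
def map_skills_to_domain_alt (skill_ids : List Int) : String :=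
  let user_skills : PySem.Set Int := PySem.Set.ofList skill_ids
  let best := domainSkills.items.foldl
    (fun (b : String × Int × Int) p =>
      let count := p.2.foldl (fun acc s => if PySem.Set.contains user_skills s then acc + 1 else acc) (0 : Int)
      let min_mark := (domainDifficultyMarks.getD p.1 ((0 : Int), (0 : Int))).1   -- KeyError unreachable: every domain is a key
      let rank := (if (85 : Int) ≥ min_mark then (1 : Int) else 0)
        + (if (80 : Int) ≥ min_mark then 1 else 0) + (if (90 : Int) ≥ min_mark then 1 else 0)
      if count > b.2.1 ∨ (count = b.2.1 ∧ rank > b.2.2) then (p.1, count, rank) else b)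
    ("", -1, -1)   -- ("", -1, -1) is Python's (None, -1, -1) start; the first domain always replaces it
  best.1

-- ===== PRECONDITION & SPEC =====
def Spec_map_skills_to_domain (skill_ids : List Int) (out : String) : Prop := out = map_skills_to_domain_alt skill_ids
instance (skill_ids : List Int) (out : String) : Decidable (Spec_map_skills_to_domain skill_ids out) := by unfold Spec_map_skills_to_domain; infer_instance

-- ===== CLAIM (what is proved, stated in full; the proofs are below) =====
def Claim_equal_map_skills_to_domain : Prop := ∀ (skill_ids : List Int), Dom_map_skills_to_domain skill_ids → Spec_map_skills_to_domain skill_ids (map_skills_to_domain skill_ids)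

-- ===== LEMMAS AND PROOFS =====

-- the rank A's stable descending sort keys on (A's fixed user marks 85/80/90)
def pvRk (d : String) : Int := getDomainRank d 85 80 90

-- the count A stores for one domain's skill list
def pvCountA (L : List Int) (sid : List Int) : Int :=
  PySem.Set.len (PySem.Set.inter (PySem.Set.ofList L) (PySem.Set.ofList sid))

-- the (domain, match count) entry list both programs effectively work on
def pvEntries (sid : List Int) : List (String × Int) :=
  domainSkills.items.map (fun p => (p.1, pvCountA p.2 sid))

-- one step of B's running best: strict lexicographic improvement on (count, rank)
def pvAstep (b x : String × Int) : String × Int :=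
  if x.2 > b.2 ∨ (x.2 = b.2 ∧ pvRk x.1 > pvRk b.1) then x else b

-- one step of the running rank argmax (first maximum wins)
def pvRstep (b x : String) : String := if pvRk b < pvRk x then x else b

-- head with "" default, the shape of A's two unreachable-[] matches
def pvHd (l : List String) : String := match l with | [] => "" | r :: _ => r

-- A's max/filter/tie-break pipeline, restated on the entry list
def pvAux (l : List (String × Int)) : String :=
  match l with
  | [] => ""
  | p :: t =>
    match (((p :: t).filter (fun q => q.2 == (t.map Prod.snd).foldl max p.2)).map Prod.fst) with
    | [] => ""
    | h :: tt => tt.foldl pvRstep h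

def pvDsHead : String × List Int := ("Full Stack Software Development", [1, 2, 3, 4, 6, 7, 11, 14, 16])

def pvDsTail : List (String × List Int) :=
  [("Data Science", [8, 19, 20, 21, 22, 23, 24, 25, 26]),
   ("Machine Learning Engineering", [8, 20, 21, 22, 23, 24, 30, 32, 33, 34]),
   ("Cybersecurity", [35, 36, 37, 38, 39, 40, 41, 42, 43]),
   ("Software Engineering", [1, 3, 10, 47, 48, 49, 50, 51, 53]),
   ("Cloud Engineering", [16, 17, 18, 56, 57, 58, 62, 63, 65]),
   ("Web Development", [1, 2, 3, 4, 5, 14, 70, 71, 72]),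
   ("DevOps", [16, 18, 56, 57, 58, 73, 74, 75, 76]),
   ("Game Development", [47, 80, 81, 82, 83, 84, 85, 86]),
   ("IT Support", [88, 89, 90, 91, 92, 93, 94, 95, 96])]

def pvE1 (sid : List Int) : String × Int := (pvDsHead.1, pvCountA pvDsHead.2 sid)

def pvETail (sid : List Int) : List (String × Int) := pvDsTail.map (fun p => (p.1, pvCountA p.2 sid))

theorem pvItemsEq : domainSkills.items = pvDsHead :: pvDsTail := rfl

theorem pvEntriesEq (sid : List Int) : pvEntries sid = pvE1 sid :: pvETail sid := rfl

-- ---- dict bookkeeping: A's counts dict is just the entry list ----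

theorem pvMapKeep (k : String) (v : Int) :
    ∀ (l : List (String × Int)), k ∉ l.map Prod.fst →
      l.map (fun q => if q.1 == k then (k, v) else q) = l := by
  intro l
  induction l with
  | nil => intro _; rfl
  | cons a t ih =>
    intro h
    simp only [List.map_cons, List.mem_cons, not_or] at h
    simp only [List.map_cons]
    rw [if_neg (by simpa [beq_iff_eq] using fun hh : a.1 = k => h.1 hh.symm), ih h.2]

theorem pvMapReplace (k : String) (v : Int) :
    ∀ (l1 l2 : List (String × Int)) (w : Int), k ∉ l1.map Prod.fst → k ∉ l2.map Prod.fst →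
      (l1 ++ (k, w) :: l2).map (fun q => if q.1 == k then (k, v) else q) = l1 ++ (k, v) :: l2 := by
  intro l1
  induction l1 with
  | nil =>
    intro l2 w _ h2
    simp only [List.nil_append, List.map_cons, beq_self_eq_true]
    rw [if_pos trivial, pvMapKeep k v l2 h2]
  | cons a t ih =>
    intro l2 w h1 h2
    simp only [List.cons_append, List.map_cons]
    have ha : a.1 ≠ k := fun hh => h1 (by simp [hh])
    rw [if_neg (by simpa [beq_iff_eq] using ha), ih l2 w (by simp at h1 ⊢; exact h1.2) h2]

theorem pvDictFold (f : String × List Int → Int) :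
    ∀ (ds : List (String × List Int)) (pre : List (String × Int)),
      (pre.map Prod.fst ++ ds.map Prod.fst).Nodup →
      ds.foldl (fun d p => d.insert p.1 (f p))
          (PySem.Dict.mk (pre ++ ds.map (fun p => (p.1, (0 : Int)))))
        = PySem.Dict.mk (pre ++ ds.map (fun p => (p.1, f p))) := by
  intro ds
  induction ds with
  | nil => intro pre _; simp
  | cons p t ih =>
    intro pre h
    have h' := h
    simp only [List.map_cons, List.nodup_append, List.nodup_cons, List.mem_cons] at h'
    obtain ⟨hpre, ⟨hpt, htn⟩, hdisj⟩ := h'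
    have hk1 : p.1 ∉ pre.map Prod.fst := fun hm => hdisj _ hm _ (Or.inl rfl) rfl
    simp only [List.foldl_cons, List.map_cons]
    have hins : PySem.Dict.insert (PySem.Dict.mk (pre ++ (p.1, (0:Int)) :: t.map (fun p => (p.1, (0:Int))))) p.1 (f p)
        = PySem.Dict.mk (pre ++ (p.1, f p) :: t.map (fun p => (p.1, (0:Int)))) := by
      unfold PySem.Dict.insert PySem.Dict.contains
      rw [if_pos]
      · congr 1
        exact pvMapReplace p.1 (f p) pre _ 0 hk1 (by simpa using hpt)
      · simp
    rw [hins]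
    have hre : pre ++ (p.1, f p) :: t.map (fun p => (p.1, (0:Int)))
        = (pre ++ [(p.1, f p)]) ++ t.map (fun p => (p.1, (0:Int))) := by simp
    have hre2 : pre ++ (p.1, f p) :: t.map (fun p => (p.1, f p))
        = (pre ++ [(p.1, f p)]) ++ t.map (fun p => (p.1, f p)) := by simp
    rw [hre, hre2]
    apply ih
    simpa using h

-- ---- the head of A's stable descending sort is the first rank argmax ----

theorem pvInsHead :
    ∀ (l : List String) (a : String) (rest : List String),
      pvHd (l.foldl (fun acc x => PySem.List.insertBy (fun a b => decide (pvRk b < pvRk a)) x acc) (a :: rest))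
        = l.foldl pvRstep a := by
  intro l
  induction l with
  | nil => intro a rest; rfl
  | cons x t ih =>
    intro a rest
    simp only [List.foldl_cons]
    by_cases hc : pvRk a < pvRk x
    · rw [show PySem.List.insertBy (fun a b => decide (pvRk b < pvRk a)) x (a :: rest) = x :: a :: rest from by
        simp [PySem.List.insertBy, hc]]
      rw [ih x (a :: rest), show pvRstep a x = x from by simp [pvRstep, hc]]
    · rw [show PySem.List.insertBy (fun a b => decide (pvRk b < pvRk a)) x (a :: rest)
          = a :: PySem.List.insertBy (fun a b => decide (pvRk b < pvRk a)) x rest from by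
        simp [PySem.List.insertBy, hc]]
      rw [ih a _, show pvRstep a x = a from by simp [pvRstep, hc]]

theorem pvSortedHead (t : List String) (h : String) :
    pvHd (PySem.List.sorted (h :: t) pvRk true) = t.foldl pvRstep h := by
  rw [PySem.List.sorted_rev_eq_foldl_insertBy]
  simp only [List.foldl_cons]
  rw [show PySem.List.insertBy (fun a b => decide (pvRk b < pvRk a)) h [] = [h] from rfl]
  exact pvInsHead t h []

-- ---- the maximum count is attained ----

theorem pvFoldMaxMem : ∀ (t : List Int) (a : Int), t.foldl max a = a ∨ t.foldl max a ∈ t := by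
  intro t
  induction t with
  | nil => intro a; exact Or.inl rfl
  | cons x t ih =>
    intro a
    simp only [List.foldl_cons, List.mem_cons]
    rcases ih (max a x) with h | h
    · rcases max_choice a x with hm | hm
      · exact Or.inl (by rw [h, hm])
      · exact Or.inr (Or.inl (by rw [h, hm]))
    · exact Or.inr (Or.inr h)

theorem pvTopNeNil (p : String × Int) (t : List (String × Int)) :
    ((p :: t).filter (fun q => q.2 == (t.map Prod.snd).foldl max p.2)).map Prod.fst ≠ [] := by
  intro hnil
  rw [List.map_eq_nil_iff, List.filter_eq_nil_iff] at hnil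
  rcases pvFoldMaxMem (t.map Prod.snd) p.2 with h | h
  · exact hnil p (List.mem_cons_self) (by simp [h])
  · rcases List.mem_map.mp h with ⟨q, hq, hq2⟩
    exact hnil q (List.mem_cons_of_mem _ hq) (by simp [hq2])

-- ---- A's port equals pvAux on the entry list ----

theorem pvPipeEq (l : List (String × Int)) (hne : l ≠ []) :
    (match PySem.List.max? (l.map Prod.snd) (fun x => x) with
     | none => ""
     | some max_skill_count =>
       let top := (l.filter (fun p => p.2 == max_skill_count)).map Prod.fst
       if top.length = 1 then
         match top with | t0 :: _ => t0 | [] => ""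
       else
         match PySem.List.sorted top (fun d => pvRk d) true with
         | r0 :: _ => r0
         | [] => "") = pvAux l := by
  rcases l with _ | ⟨p, t⟩
  · exact absurd rfl hne
  · simp only [List.map_cons, PySem.List.max?_id_cons]
    simp only [pvAux]
    rcases h : ((p :: t).filter (fun q => q.2 == (t.map Prod.snd).foldl max p.2)).map Prod.fst with _ | ⟨h0, tt⟩
    · exact absurd h (pvTopNeNil p t)
    · simp only [h]
      rcases tt with _ | ⟨h1, tt2⟩
      · simp
      · rw [if_neg (by simp)]
        have hs := pvSortedHead (h1 :: tt2) h0
        rcases hsort : PySem.List.sorted (h0 :: h1 :: tt2) pvRk true with _ | ⟨r0, rs⟩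
        · rw [PySem.List.sorted_eq_nil_iff] at hsort
          exact absurd hsort (by simp)
        · rw [hsort] at hs
          simpa [pvHd] using hs

theorem pvABridge (sid : List Int) : map_skills_to_domain sid = pvAux (pvEntries sid) := by
  have hinit : PySem.Dict.mk (domainSkills.keys.map (fun k => (k, (0 : Int))))
      = PySem.Dict.mk (domainSkills.items.map (fun p => (p.1, (0 : Int)))) := by
    simp [PySem.Dict.keys, List.map_map, Function.comp]
  have hc := pvDictFold (fun p => PySem.Set.len (PySem.Set.inter (PySem.Set.ofList p.2) (PySem.Set.ofList sid)))
    domainSkills.items [] (by decide)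
  simp only [List.nil_append] at hc
  unfold map_skills_to_domain
  simp only [hinit, hc]
  exact pvPipeEq (pvEntries sid) (by rw [pvEntriesEq]; simp)

-- ---- merging the first two entries into their lexicographic winner preserves pvAux ----

theorem pvAuxMerge (p x : String × Int) (t : List (String × Int)) :
    pvAux (p :: x :: t) = pvAux (pvAstep p x :: t) := by
  have hw2 : (pvAstep p x).2 = max p.2 x.2 := by
    unfold pvAstep
    split_ifs with h
    · rcases h with h | ⟨h, _⟩ <;> omega
    · simp only [not_or, not_and, not_lt] at h
      rcases h with ⟨h1, h2⟩
      by_cases he : x.2 = p.2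
      · omega
      · omega
  simp only [pvAux]
  have hM : ((x :: t).map Prod.snd).foldl max p.2 = (t.map Prod.snd).foldl max (pvAstep p x).2 := by
    simp only [List.map_cons, List.foldl_cons, hw2]
  rw [hM]
  set w := pvAstep p x with hw
  set M := (t.map Prod.snd).foldl max w.2 with hMdef
  have hge : w.2 ≤ M := by
    rw [hMdef]
    exact (PySem.List.le_foldl_max (t.map Prod.snd) w.2).1
  simp only [List.filter_cons]
  by_cases hx : x.2 = p.2
  · have hweq : w = if pvRk p.1 < pvRk x.1 then x else p := by
      rw [hw]
      unfold pvAstep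
      by_cases hr : pvRk p.1 < pvRk x.1
      · rw [if_pos (Or.inr ⟨hx, hr⟩), if_pos hr]
      · rw [if_neg (by rintro (h | ⟨_, h⟩) <;> omega), if_neg hr]
    have hw2' : w.2 = p.2 := by
      rw [hweq]
      split <;> simp [hx]
    by_cases hm : p.2 = M
    · have hbp : (p.2 == M) = true := by simp [hm]
      have hbx : (x.2 == M) = true := by simp [hx, hm]
      have hbw : (w.2 == M) = true := by simp [hw2', hm]
      simp only [hbp, hbx, hbw, if_true]
      simp only [List.map_cons, List.foldl_cons]
      have hstep : pvRstep p.1 x.1 = w.1 := by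
        rw [hweq]
        unfold pvRstep
        by_cases hr : pvRk p.1 < pvRk x.1
        · rw [if_pos hr, if_pos hr]
        · rw [if_neg hr, if_neg hr]
      rw [hstep]
    · have hbp : (p.2 == M) = false := by simp [hm]
      have hbx : (x.2 == M) = false := by rw [hx]; simp [hm]
      have hbw : (w.2 == M) = false := by rw [hw2']; simp [hm]
      simp only [hbp, hbx, hbw, Bool.false_eq_true, if_false]
  · by_cases hgt : p.2 < x.2
    · have hwx : w = x := by
        rw [hw]
        unfold pvAstep
        rw [if_pos (Or.inl hgt)]
      have hple : p.2 < M := by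
        have : w.2 = x.2 := by rw [hwx]
        omega
      have hbp : (p.2 == M) = false := by
        simp only [beq_eq_false_iff_ne]
        omega
      simp only [hbp, Bool.false_eq_true, if_false, hwx]
    · have hlt : x.2 < p.2 := by omega
      have hwp : w = p := by
        rw [hw]
        unfold pvAstep
        rw [if_neg]
        rintro (h | ⟨h, _⟩) <;> omega
      have hxle : x.2 < M := by
        have : w.2 = p.2 := by rw [hwp]
        omega
      have hbx : (x.2 == M) = false := by
        simp only [beq_eq_false_iff_ne]
        omega
      simp only [hbx, Bool.false_eq_true, if_false, hwp]

theorem pvMainA : ∀ (t : List (String × Int)) (p : String × Int),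
    pvAux (p :: t) = (t.foldl pvAstep p).1 := by
  intro t
  induction t with
  | nil =>
    intro p
    simp only [List.foldl_nil]
    unfold pvAux
    simp
  | cons x t ih =>
    intro p
    rw [pvAuxMerge p x t, List.foldl_cons]
    exact ih (pvAstep p x)

-- ---- B's count equals A's count ----

theorem pvOfListAux : ∀ (L acc : List Int), (acc ++ L).Nodup → L.foldl PySem.Set.add acc = acc ++ L := by
  intro L
  induction L with
  | nil => intro acc _; simp [List.foldl_nil]
  | cons x t ih =>
    intro acc h
    simp only [List.foldl_cons]
    have hx : PySem.Set.add acc x = acc ++ [x] := by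
      unfold PySem.Set.add PySem.Set.contains
      rw [if_neg]
      simp only [List.contains_eq_mem, decide_eq_true_eq]
      have := h
      simp only [List.nodup_append, List.nodup_cons] at this
      exact fun hm => this.2.2 _ hm _ (by simp) rfl
    rw [hx, ih (acc ++ [x]) (by simpa using h)]
    simp

theorem pvOfListNodup (L : List Int) (h : L.Nodup) : PySem.Set.ofList L = L := by
  unfold PySem.Set.ofList
  simpa using pvOfListAux L [] (by simpa using h)

theorem pvCountEq (L : List Int) (hL : L.Nodup) (sid : List Int) :
    L.foldl (fun acc s => if PySem.Set.contains (PySem.Set.ofList sid) s then acc + 1 else acc) (0 : Int)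
      = pvCountA L sid := by
  rw [PySem.List.foldl_if_add_one]
  unfold pvCountA PySem.Set.len PySem.Set.inter PySem.Set.contains
  rw [pvOfListNodup L hL, List.countP_eq_length_filter]
  omega

-- ---- B's triple-state fold is the pair-state fold with pvRk ----

theorem pvFoldBC (sid : List Int) :
    ∀ (ds : List (String × List Int)) (b : String × Int × Int),
      b.2.2 = pvRk b.1 →
      (∀ p ∈ ds, p.2.Nodup) →
      (∀ p ∈ ds, (if (85 : Int) ≥ (domainDifficultyMarks.getD p.1 ((0 : Int), (0 : Int))).1 then (1 : Int) else 0)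
          + (if (80 : Int) ≥ (domainDifficultyMarks.getD p.1 ((0 : Int), (0 : Int))).1 then 1 else 0)
          + (if (90 : Int) ≥ (domainDifficultyMarks.getD p.1 ((0 : Int), (0 : Int))).1 then 1 else 0) = pvRk p.1) →
      (ds.foldl (fun (b : String × Int × Int) p =>
          if p.2.foldl (fun acc s => if PySem.Set.contains (PySem.Set.ofList sid) s then acc + 1 else acc) (0 : Int) > b.2.1 ∨ (p.2.foldl (fun acc s => if PySem.Set.contains (PySem.Set.ofList sid) s then acc + 1 else acc) (0 : Int) = b.2.1 ∧ ((if (85 : Int) ≥ (domainDifficultyMarks.getD p.1 ((0 : Int), (0 : Int))).1 then (1 : Int) else 0) + (if (80 : Int) ≥ (domainDifficultyMarks.getD p.1 ((0 : Int), (0 : Int))).1 then 1 else 0) + (if (90 : Int) ≥ (domainDifficultyMarks.getD p.1 ((0 : Int), (0 : Int))).1 then 1 else 0)) > b.2.2)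
          then (p.1, p.2.foldl (fun acc s => if PySem.Set.contains (PySem.Set.ofList sid) s then acc + 1 else acc) (0 : Int), (if (85 : Int) ≥ (domainDifficultyMarks.getD p.1 ((0 : Int), (0 : Int))).1 then (1 : Int) else 0) + (if (80 : Int) ≥ (domainDifficultyMarks.getD p.1 ((0 : Int), (0 : Int))).1 then 1 else 0) + (if (90 : Int) ≥ (domainDifficultyMarks.getD p.1 ((0 : Int), (0 : Int))).1 then 1 else 0)) else b) b).1
        = ((ds.map (fun p => (p.1, pvCountA p.2 sid))).foldl pvAstep (b.1, b.2.1)).1 := by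
  intro ds
  induction ds with
  | nil => intro b _ _ _; rfl
  | cons p t ih =>
    intro b hb hnd hrk
    simp only [List.foldl_cons, List.map_cons]
    rw [pvCountEq p.2 (hnd p (by simp)) sid, hrk p (by simp)]
    by_cases hC : pvCountA p.2 sid > b.2.1 ∨ (pvCountA p.2 sid = b.2.1 ∧ pvRk p.1 > b.2.2)
    · rw [if_pos hC]
      rw [ih (p.1, pvCountA p.2 sid, pvRk p.1) rfl (fun q hq => hnd q (by simp [hq])) (fun q hq => hrk q (by simp [hq]))]
      have harg : pvAstep (b.1, b.2.1) (p.1, pvCountA p.2 sid) = (p.1, pvCountA p.2 sid) := by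
        unfold pvAstep
        rw [if_pos]
        rcases hC with h | ⟨h1, h2⟩
        · exact Or.inl h
        · exact Or.inr ⟨h1, by rw [← hb]; exact h2⟩
      rw [harg]
    · rw [if_neg hC]
      rw [ih b hb (fun q hq => hnd q (by simp [hq])) (fun q hq => hrk q (by simp [hq]))]
      have harg : pvAstep (b.1, b.2.1) (p.1, pvCountA p.2 sid) = (b.1, b.2.1) := by
        unfold pvAstep
        rw [if_neg]
        rintro (h | ⟨h1, h2⟩)
        · exact hC (Or.inl h)
        · exact hC (Or.inr ⟨h1, by rw [hb]; exact h2⟩)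
      rw [harg]

theorem pvCountANonneg (L sid : List Int) : 0 ≤ pvCountA L sid := by
  unfold pvCountA PySem.Set.len
  exact Int.natCast_nonneg _

-- ---- B's port equals the pair fold over the entry list ----

theorem pvBBridge (sid : List Int) :
    map_skills_to_domain_alt sid = ((pvETail sid).foldl pvAstep (pvE1 sid)).1 := by
  unfold map_skills_to_domain_alt
  simp only [pvItemsEq, List.foldl_cons]
  have hfirst : (if pvDsHead.2.foldl (fun acc s => if PySem.Set.contains (PySem.Set.ofList sid) s then acc + 1 else acc) (0 : Int) > (-1 : Int) ∨ (pvDsHead.2.foldl (fun acc s => if PySem.Set.contains (PySem.Set.ofList sid) s then acc + 1 else acc) (0 : Int) = (-1 : Int) ∧ ((if (85 : Int) ≥ (domainDifficultyMarks.getD pvDsHead.1 ((0 : Int), (0 : Int))).1 then (1 : Int) else 0) + (if (80 : Int) ≥ (domainDifficultyMarks.getD pvDsHead.1 ((0 : Int), (0 : Int))).1 then 1 else 0) + (if (90 : Int) ≥ (domainDifficultyMarks.getD pvDsHead.1 ((0 : Int), (0 : Int))).1 then 1 else 0)) > (-1 : Int))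
          then (pvDsHead.1, pvDsHead.2.foldl (fun acc s => if PySem.Set.contains (PySem.Set.ofList sid) s then acc + 1 else acc) (0 : Int), (if (85 : Int) ≥ (domainDifficultyMarks.getD pvDsHead.1 ((0 : Int), (0 : Int))).1 then (1 : Int) else 0) + (if (80 : Int) ≥ (domainDifficultyMarks.getD pvDsHead.1 ((0 : Int), (0 : Int))).1 then 1 else 0) + (if (90 : Int) ≥ (domainDifficultyMarks.getD pvDsHead.1 ((0 : Int), (0 : Int))).1 then 1 else 0)) else (("", -1, -1) : String × Int × Int))
      = (pvDsHead.1, pvCountA pvDsHead.2 sid, pvRk pvDsHead.1) := by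
    rw [pvCountEq pvDsHead.2 (by decide) sid]
    rw [if_pos (Or.inl (by have := pvCountANonneg pvDsHead.2 sid; omega))]
    have hrnk : ((if (85 : Int) ≥ (domainDifficultyMarks.getD pvDsHead.1 ((0 : Int), (0 : Int))).1 then (1 : Int) else 0) + (if (80 : Int) ≥ (domainDifficultyMarks.getD pvDsHead.1 ((0 : Int), (0 : Int))).1 then 1 else 0) + (if (90 : Int) ≥ (domainDifficultyMarks.getD pvDsHead.1 ((0 : Int), (0 : Int))).1 then 1 else 0)) = pvRk pvDsHead.1 := by decide
    rw [hrnk]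
  rw [hfirst]
  rw [pvFoldBC sid pvDsTail (pvDsHead.1, pvCountA pvDsHead.2 sid, pvRk pvDsHead.1) rfl (by decide) (by decide)]
  rfl

-- ===== VERDICT (by name: the statement is the Claim_ definition above) =====
theorem map_skills_to_domain_spec : Claim_equal_map_skills_to_domain := by
  intro sid _
  unfold Spec_map_skills_to_domain
  rw [pvABridge sid, pvEntriesEq sid, pvMainA, pvBBridge sid]
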